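-- pv_equiv track=rewrite | github.com/AlfiMuhtadii/gap-architect | backend/app/services/skill_matcher.py | _fuzzy_contains
-- ===== SOURCE A (Python) =====
-- def _levenshtein(a: str, b: str) -> int:
--     if a == b:
--         return 0
--     if not a:
--         return len(b)
--     if not b:
--         return len(a)
--     prev = list(range(len(b) + 1))
--     for i, ca in enumerate(a, start=1):
--         curr = [i]
--         for j, cb in enumerate(b, start=1):
--             ins = prev[j] + 1
--             delete = curr[j - 1] + 1
--             sub = prev[j - 1] + (0 if ca == cb else 1)
--             curr.append(min(ins, delete, sub))
--         prev = curr
--     return prev[-1]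
--
-- def _fuzzy_contains(text: str, label: str) -> bool:
--     t_tokens = text.split()
--     l_tokens = label.split()
--     if not l_tokens:
--         return False
--     if len(l_tokens) == 1:
--         target = l_tokens[0]
--         for token in t_tokens:
--             if abs(len(token) - len(target)) <= 1 and _levenshtein(token, target) <= 1:
--                 return True
--         return False
--     for lt in l_tokens:
--         matched = False
--         for token in t_tokens:
--             if abs(len(token) - len(lt)) <= 1 and _levenshtein(token, lt) <= 1:
--                 matched = True
--                 break
--         if not matched:
--             return False
--     return True
-- ===== SOURCE B (Python) =====
-- def _edit1(a: str, b: str) -> bool: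
--     if abs(len(a) - len(b)) > 1:
--         return False
--     while a and b and a[0] == b[0]:
--         a, b = a[1:], b[1:]
--     return a[1:] == b[1:] or a == b[1:] or a[1:] == b
--
-- def _fuzzy_contains(text: str, label: str) -> bool:
--     t_tokens = text.split()
--     l_tokens = label.split()
--     if not l_tokens:
--         return False
--     return all(any(_edit1(t, lt) for t in t_tokens) for lt in l_tokens)
-- ===== Notes on version B (the rewrite author's own statement) =====
-- stated objective: faster
-- what changed: replaced the full O(|a|*|b|) Levenshtein DP table (plus special-cased single-token loop and matched/break flag loops) with an O(n) edit-distance-at-most-1 test - strip the common prefix, then compare one of three suffix pairs - driven by all/any over the token lists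
import Mathlib
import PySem

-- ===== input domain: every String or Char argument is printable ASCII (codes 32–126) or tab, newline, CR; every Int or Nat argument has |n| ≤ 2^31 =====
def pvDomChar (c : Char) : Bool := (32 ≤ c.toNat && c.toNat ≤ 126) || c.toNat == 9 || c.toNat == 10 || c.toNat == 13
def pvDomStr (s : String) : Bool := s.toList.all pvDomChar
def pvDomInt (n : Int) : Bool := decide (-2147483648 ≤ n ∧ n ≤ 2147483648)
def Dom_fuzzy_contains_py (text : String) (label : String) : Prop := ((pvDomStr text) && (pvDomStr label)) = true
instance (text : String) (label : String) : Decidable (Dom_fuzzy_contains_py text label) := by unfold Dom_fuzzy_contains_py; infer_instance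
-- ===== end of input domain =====

-- B replaces A's per-pair O(|a|*|b|) Levenshtein DP (and its duplicated token loops) with an
-- O(n) edit-distance-at-most-1 check (strip common prefix, compare three suffix pairs) under all/any; objective: faster.

-- ===== PORT A =====

-- _levenshtein(a, b): full DP over prefix rows (indices always in range; pyGetD's default is never used)
def pvLevA (a : String) (b : String) : Int :=
  if a == b then 0
  else if a == "" then PySem.Str.len b
  else if b == "" then PySem.Str.len a
  else
    let prev0 : List Int := PySem.List.pyRange 0 (PySem.Str.len b + 1) 1
    let prev := (PySem.List.enumerate a.toList 1).foldl (fun prev icab =>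
      (PySem.List.enumerate b.toList 1).foldl (fun curr jcb =>
        let ins := PySem.List.pyGetD prev jcb.1 0 + 1
        let delete := PySem.List.pyGetD curr (jcb.1 - 1) 0 + 1
        let sub := PySem.List.pyGetD prev (jcb.1 - 1) 0 + (if icab.2 == jcb.2 then 0 else 1)
        curr ++ [min ins (min delete sub)]) [icab.1]) prev0
    PySem.List.pyGetD prev (-1) 0

-- 'abs(len(token) - len(lt)) <= 1 and _levenshtein(token, lt) <= 1'
def pvCondA (token : String) (lt : String) : Bool :=
  ((PySem.Str.len token - PySem.Str.len lt).natAbs ≤ 1) && (pvLevA token lt ≤ 1)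

-- the 'for token in t_tokens: … break' loop (used once per label token; A writes it twice textually)
def pvAnyMatchA (t_tokens : List String) (lt : String) : Bool :=
  match t_tokens with
  | [] => false
  | t :: ts => if pvCondA t lt then true else pvAnyMatchA ts lt

-- the 'for lt in l_tokens: … if not matched: return False' loop
def pvAllMatchA (t_tokens : List String) (l_tokens : List String) : Bool :=
  match l_tokens with
  | [] => true
  | lt :: rest => if pvAnyMatchA t_tokens lt then pvAllMatchA t_tokens rest else false

def fuzzy_contains_py (text : String) (label : String) : Bool :=
  let t_tokens := PySem.Str.split₀ text
  let l_tokens := PySem.Str.split₀ label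
  if l_tokens == [] then false
  else if l_tokens.length == 1 then
    let target := PySem.List.pyGetD l_tokens 0 ""
    pvAnyMatchA t_tokens target
  else pvAllMatchA t_tokens l_tokens

-- ===== PORT B =====

-- 'a[1:] == b[1:] or a == b[1:] or a[1:] == b'  (drop 1 is exactly the slice [1:])
def pvCheck1 (a : List Char) (b : List Char) : Bool :=
  (a.drop 1 == b.drop 1) || (a == b.drop 1) || (a.drop 1 == b)

-- 'while a and b and a[0] == b[0]: a, b = a[1:], b[1:]' then the suffix check
def pvGoB (a : List Char) (b : List Char) : Bool :=
  match a, b with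
  | x :: xs, y :: ys => if x == y then pvGoB xs ys else pvCheck1 (x :: xs) (y :: ys)
  | a, b => pvCheck1 a b

def pvEdit1 (a : String) (b : String) : Bool :=
  if 1 < (PySem.Str.len a - PySem.Str.len b).natAbs then false
  else pvGoB a.toList b.toList

def fuzzy_contains_py_alt (text : String) (label : String) : Bool :=
  let t_tokens := PySem.Str.split₀ text
  let l_tokens := PySem.Str.split₀ label
  if l_tokens == [] then false
  else l_tokens.all (fun lt => t_tokens.any (fun t => pvEdit1 t lt))

-- ===== PRECONDITION & SPEC =====
def Spec_fuzzy_contains_py (text : String) (label : String) (out : Bool) : Prop := out = fuzzy_contains_py_alt text label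
instance (text : String) (label : String) (out : Bool) : Decidable (Spec_fuzzy_contains_py text label out) := by unfold Spec_fuzzy_contains_py; infer_instance

-- ===== CLAIM (what is proved, stated in full; the proofs are below) =====
def Claim_equal_fuzzy_contains_py : Prop := ∀ (text : String) (label : String), Dom_fuzzy_contains_py text label → Spec_fuzzy_contains_py text label (fuzzy_contains_py text label)

-- ===== LEMMAS AND PROOFS =====

-- reference Levenshtein distance, head recursion
def pvLev (a : List Char) (b : List Char) : Nat :=
  match a, b with
  | [], ys => ys.length
  | x :: xs, [] => (x :: xs).length
  | x :: xs, y :: ys =>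
      min (pvLev xs (y :: ys) + 1) (min (pvLev (x :: xs) ys + 1) (pvLev xs ys + (if x = y then 0 else 1)))
termination_by a.length + b.length
decreasing_by all_goals simp <;> omega

theorem pvLev_nil_right (xs : List Char) : pvLev xs [] = xs.length := by
  cases xs <;> simp [pvLev]

theorem pvLev_nil_left (ys : List Char) : pvLev [] ys = ys.length := by
  cases ys <;> simp [pvLev]

theorem pvLev_cons_left_le (x : Char) (xs ys : List Char) : pvLev (x :: xs) ys ≤ pvLev xs ys + 1 := by
  cases ys with
  | nil => simp [pvLev_nil_right]
  | cons y ys' =>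
      have : pvLev (x :: xs) (y :: ys') =
          min (pvLev xs (y :: ys') + 1)
            (min (pvLev (x :: xs) ys' + 1) (pvLev xs ys' + (if x = y then 0 else 1))) := by rw [pvLev]
      rw [this]; omega

theorem pvLev_cons_right_le (y : Char) (xs ys : List Char) : pvLev xs (y :: ys) ≤ pvLev xs ys + 1 := by
  cases xs with
  | nil => simp [pvLev_nil_left]
  | cons x xs' =>
      have : pvLev (x :: xs') (y :: ys) =
          min (pvLev xs' (y :: ys) + 1)
            (min (pvLev (x :: xs') ys + 1) (pvLev xs' ys + (if x = y then 0 else 1))) := by rw [pvLev]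
      rw [this]; omega

theorem pvLev_lip : ∀ (n : Nat) (xs ys : List Char), xs.length + ys.length ≤ n →
    (∀ x, pvLev xs ys ≤ pvLev (x :: xs) ys + 1) ∧ (∀ y, pvLev xs ys ≤ pvLev xs (y :: ys) + 1) := by
  intro n
  induction n with
  | zero =>
      intro xs ys h
      have hx : xs = [] := by cases xs <;> simp_all
      have hy : ys = [] := by cases ys <;> simp_all
      subst hx; subst hy
      refine ⟨fun x => ?_, fun y => ?_⟩ <;> simp [pvLev]
  | succ n ih =>
      intro xs ys h
      constructor
      · intro x
        cases ys with
        | nil => simp [pvLev_nil_right]; omega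
        | cons y ys' =>
            have h1 : pvLev xs (y :: ys') ≤ pvLev xs ys' + 1 := pvLev_cons_right_le y xs ys'
            have h2 : pvLev xs ys' ≤ pvLev (x :: xs) ys' + 1 :=
              (ih xs ys' (by simp at h ⊢; omega)).1 x
            have hsplit : pvLev (x :: xs) (y :: ys') =
                min (pvLev xs (y :: ys') + 1)
                  (min (pvLev (x :: xs) ys' + 1) (pvLev xs ys' + (if x = y then 0 else 1))) := by
              rw [pvLev]
            rw [hsplit]; omega
      · intro y
        cases xs with
        | nil => simp [pvLev]; omega
        | cons x xs' =>
            have h1 : pvLev (x :: xs') ys ≤ pvLev xs' ys + 1 := pvLev_cons_left_le x xs' ys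
            have h2 : pvLev xs' ys ≤ pvLev xs' (y :: ys) + 1 :=
              (ih xs' ys (by simp at h ⊢; omega)).2 y
            have hsplit : pvLev (x :: xs') (y :: ys) =
                min (pvLev xs' (y :: ys) + 1)
                  (min (pvLev (x :: xs') ys + 1) (pvLev xs' ys + (if x = y then 0 else 1))) := by
              rw [pvLev]
            rw [hsplit]; omega

theorem pvLev_cons_same (x : Char) (xs ys : List Char) : pvLev (x :: xs) (x :: ys) = pvLev xs ys := by
  have hsplit : pvLev (x :: xs) (x :: ys) =
      min (pvLev xs (x :: ys) + 1)
        (min (pvLev (x :: xs) ys + 1) (pvLev xs ys + (if x = x then 0 else 1))) := by rw [pvLev]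
  have h1 := (pvLev_lip (xs.length + ys.length) xs ys le_rfl).1 x
  have h2 := (pvLev_lip (xs.length + ys.length) xs ys le_rfl).2 x
  rw [hsplit, if_pos rfl]; omega

theorem pvLev_eq_zero_iff (xs ys : List Char) : pvLev xs ys = 0 ↔ xs = ys := by
  induction xs generalizing ys with
  | nil => cases ys <;> simp [pvLev]
  | cons x xs ih =>
      cases ys with
      | nil => simp [pvLev_nil_right]
      | cons y ys =>
          by_cases hxy : x = y
          · subst hxy; rw [pvLev_cons_same, ih]; simp
          · have hsplit : pvLev (x :: xs) (y :: ys) =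
                min (pvLev xs (y :: ys) + 1)
                  (min (pvLev (x :: xs) ys + 1) (pvLev xs ys + (if x = y then 0 else 1))) := by rw [pvLev]
            rw [hsplit, if_neg hxy]
            simp [hxy]

theorem pvLev_single_left (x : Char) (ws : List Char) :
    pvLev [x] ws = if ws = [] then 1 else if x ∈ ws then ws.length - 1 else ws.length := by
  induction ws with
  | nil => simp [pvLev]
  | cons w ws ih =>
      have hsplit : pvLev [x] (w :: ws) =
          min (pvLev [] (w :: ws) + 1)
            (min (pvLev [x] ws + 1) (pvLev [] ws + (if x = w then 0 else 1))) := by conv_lhs => rw [pvLev]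
      have hn1 : pvLev [] (w :: ws) = ws.length + 1 := by simp [pvLev]
      have hn2 : pvLev [] ws = ws.length := by cases ws <;> simp [pvLev]
      rw [hsplit, hn1, hn2, ih]
      by_cases hxw : x = w <;> by_cases hmem : x ∈ ws <;>
        rcases ws with _ | ⟨w2, ws2⟩ <;> simp_all

theorem pvLev_single_right (y : Char) (zs : List Char) :
    pvLev zs [y] = if zs = [] then 1 else if y ∈ zs then zs.length - 1 else zs.length := by
  induction zs with
  | nil => simp [pvLev]
  | cons z zs ih =>
      have hsplit : pvLev (z :: zs) [y] =
          min (pvLev zs [y] + 1)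
            (min (pvLev (z :: zs) [] + 1) (pvLev zs [] + (if z = y then 0 else 1))) := by conv_lhs => rw [pvLev]
      rw [hsplit, pvLev_nil_right, pvLev_nil_right, ih]
      by_cases hzy : z = y <;> by_cases hmem : y ∈ zs <;>
        rcases zs with _ | ⟨z2, zs2⟩ <;> simp_all [pvLev, pvLev_nil_right] <;> exact fun h => hzy h.symm

theorem pvLev_append : ∀ (n : Nat) (xs ys : List Char) (x y : Char), xs.length + ys.length ≤ n →
    pvLev (xs ++ [x]) (ys ++ [y]) =
      min (pvLev xs (ys ++ [y]) + 1) (min (pvLev (xs ++ [x]) ys + 1) (pvLev xs ys + (if x = y then 0 else 1))) := by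
  intro n
  induction n with
  | zero =>
      intro xs ys x y h
      have hx : xs = [] := by cases xs <;> simp_all
      have hy : ys = [] := by cases ys <;> simp_all
      subst hx; subst hy
      by_cases hxy : x = y <;> simp [pvLev, hxy]
  | succ n ih =>
      intro xs ys x y h
      cases xs with
      | nil =>
          simp only [List.nil_append]
          rw [pvLev_single_left, pvLev_single_left]
          have h0 : pvLev ([] : List Char) (ys ++ [y]) = ys.length + 1 := by
            cases ys <;> simp [pvLev]
          have h1 : pvLev ([] : List Char) ys = ys.length := by
            cases ys <;> simp [pvLev]
          rw [h0, h1]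
          by_cases hxy : x = y <;> by_cases hmem : x ∈ ys <;>
            rcases ys with _ | ⟨y2, ys2⟩ <;> simp_all
      | cons x' xs' =>
          cases ys with
          | nil =>
              simp only [List.nil_append]
              rw [pvLev_single_right, pvLev_single_right]
              have h0 : pvLev ((x' :: xs') ++ [x]) ([] : List Char) = xs'.length + 2 := by
                rw [pvLev_nil_right]; simp
              have h1 : pvLev (x' :: xs') ([] : List Char) = xs'.length + 1 := by
                rw [pvLev_nil_right]; simp
              rw [h0, h1]
              by_cases hxy : x = y <;> by_cases hmem : y ∈ x' :: xs' <;>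
                simp_all <;> tauto
          | cons y' ys' =>
              have hb : (x' :: xs').length + ys'.length ≤ n := by simp at h ⊢; omega
              have hb2 : xs'.length + (y' :: ys').length ≤ n := by simp at h ⊢; omega
              have hb3 : xs'.length + ys'.length ≤ n := by simp at h ⊢; omega
              have e1 := ih xs' (y' :: ys') x y hb2
              have e2 := ih (x' :: xs') ys' x y hb
              have e3 := ih xs' ys' x y hb3
              simp only [List.cons_append] at e1 e2 ⊢
              have hL : pvLev (x' :: (xs' ++ [x])) (y' :: (ys' ++ [y])) =
                  min (pvLev (xs' ++ [x]) (y' :: (ys' ++ [y])) + 1)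
                    (min (pvLev (x' :: (xs' ++ [x])) (ys' ++ [y]) + 1)
                      (pvLev (xs' ++ [x]) (ys' ++ [y]) + (if x' = y' then 0 else 1))) := by
                conv_lhs => rw [pvLev]
              have hR1 : pvLev (x' :: xs') (y' :: (ys' ++ [y])) =
                  min (pvLev xs' (y' :: (ys' ++ [y])) + 1)
                    (min (pvLev (x' :: xs') (ys' ++ [y]) + 1)
                      (pvLev xs' (ys' ++ [y]) + (if x' = y' then 0 else 1))) := by
                conv_lhs => rw [pvLev]
              have hR2 : pvLev (x' :: (xs' ++ [x])) (y' :: ys') =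
                  min (pvLev (xs' ++ [x]) (y' :: ys') + 1)
                    (min (pvLev (x' :: (xs' ++ [x])) ys' + 1)
                      (pvLev (xs' ++ [x]) ys' + (if x' = y' then 0 else 1))) := by
                conv_lhs => rw [pvLev]
              have hR3 : pvLev (x' :: xs') (y' :: ys') =
                  min (pvLev xs' (y' :: ys') + 1)
                    (min (pvLev (x' :: xs') ys' + 1)
                      (pvLev xs' ys' + (if x' = y' then 0 else 1))) := by
                conv_lhs => rw [pvLev]
              rw [hL, hR1, hR2, hR3, e1, e2, e3]
              generalize (if x = y then (0:Nat) else 1) = c1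
              generalize (if x' = y' then (0:Nat) else 1) = c2
              generalize pvLev xs' (y' :: (ys' ++ [y])) = p
              generalize pvLev (xs' ++ [x]) (y' :: ys') = q
              generalize pvLev xs' (y' :: ys') = r
              generalize pvLev (x' :: xs') (ys' ++ [y]) = s
              generalize pvLev (x' :: (xs' ++ [x])) ys' = t
              generalize pvLev (x' :: xs') ys' = u
              generalize pvLev xs' (ys' ++ [y]) = v
              generalize pvLev (xs' ++ [x]) ys' = w
              generalize pvLev xs' ys' = z
              clear hL hR1 hR2 hR3 e1 e2 e3 hb hb2 hb3 h ih
              simp only [← min_add_add_right]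
              ring_nf
              ac_rfl

-- one row of A's DP: folding the inner loop over the enumerated b extends the partial row of f-values
theorem pvDP_inner (ca : Char) (g f : Nat → Int) (b : List Char)
    (hrec : ∀ (j : Nat) (h : j < b.length),
      f (j + 1) = min (g (j + 1) + 1) (min (f j + 1) (g j + (if ca == b[j] then 0 else 1)))) :
    ∀ (tl : List Char) (k : Nat), tl = b.drop k → k ≤ b.length →
    (PySem.List.enumerate tl ((k : Int) + 1)).foldl
      (fun curr jcb => curr ++
        [min (PySem.List.pyGetD ((List.range (b.length + 1)).map g) jcb.1 0 + 1)
          (min (PySem.List.pyGetD curr (jcb.1 - 1) 0 + 1)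
            (PySem.List.pyGetD ((List.range (b.length + 1)).map g) (jcb.1 - 1) 0 +
              (if ca == jcb.2 then 0 else 1)))])
      ((List.range (k + 1)).map f)
    = (List.range (b.length + 1)).map f := by
  intro tl
  induction tl with
  | nil =>
      intro k hdrop hk
      have hlen : b.length ≤ k := by
        have := congrArg List.length hdrop
        simp at this; omega
      have : k = b.length := le_antisymm hk hlen
      subst this
      simp [PySem.List.enumerate_nil]
  | cons c tl' ih =>
      intro k hdrop hk
      have hklt : k < b.length := by
        by_contra hge
        rw [List.drop_eq_nil_of_le (by omega)] at hdrop
        exact List.cons_ne_nil c tl' hdrop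
      have hdec : b.drop k = b[k] :: b.drop (k + 1) := List.drop_eq_getElem_cons hklt
      rw [hdec] at hdrop
      obtain ⟨hc, htl⟩ : c = b[k] ∧ tl' = b.drop (k + 1) := by
        have := hdrop
        simp only [List.cons.injEq] at this
        exact this
      rw [PySem.List.enumerate_cons, List.foldl_cons]
      have hacc :
          ((List.range (k + 1)).map f ++
            [min (PySem.List.pyGetD ((List.range (b.length + 1)).map g) ((k : Int) + 1) 0 + 1)
              (min (PySem.List.pyGetD ((List.range (k + 1)).map f) (((k : Int) + 1) - 1) 0 + 1)
                (PySem.List.pyGetD ((List.range (b.length + 1)).map g) (((k : Int) + 1) - 1) 0 +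
                  (if ca == c then 0 else 1)))])
          = (List.range (k + 2)).map f := by
        have e1 : PySem.List.pyGetD ((List.range (b.length + 1)).map g) ((k : Int) + 1) 0 = g (k + 1) := by
          have : ((k : Int) + 1) = ((k + 1 : Nat) : Int) := by push_cast; ring
          rw [this, PySem.List.pyGetD_natCast, PySem.List.getD_map_range _ _ _ _ (by omega)]
        have e2 : PySem.List.pyGetD ((List.range (k + 1)).map f) (((k : Int) + 1) - 1) 0 = f k := by
          have : (((k : Int) + 1) - 1) = ((k : Nat) : Int) := by ring
          rw [this, PySem.List.pyGetD_natCast, PySem.List.getD_map_range _ _ _ _ (by omega)]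
        have e3 : PySem.List.pyGetD ((List.range (b.length + 1)).map g) (((k : Int) + 1) - 1) 0 = g k := by
          have : (((k : Int) + 1) - 1) = ((k : Nat) : Int) := by ring
          rw [this, PySem.List.pyGetD_natCast, PySem.List.getD_map_range _ _ _ _ (by omega)]
        rw [e1, e2, e3, hc, ← hrec k hklt]
        rw [show k + 2 = (k + 1) + 1 by rfl, List.range_succ, List.map_append,
          List.range_succ, List.map_append]
        simp [List.range_succ]
      rw [hacc]
      have : ((k : Int) + 1) + 1 = (((k + 1 : Nat) : Int) + 1) := by push_cast; ring
      rw [this]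
      exact ih (k + 1) htl (by omega)

-- the outer loop of A's DP turns the row for a-prefix (a.take k) into the row for a
theorem pvDP_outer (a b : List Char) :
    ∀ (tl : List Char) (k : Nat), tl = a.drop k → k ≤ a.length →
    (PySem.List.enumerate tl ((k : Int) + 1)).foldl
      (fun prev icab =>
        (PySem.List.enumerate b 1).foldl
          (fun curr jcb => curr ++
            [min (PySem.List.pyGetD prev jcb.1 0 + 1)
              (min (PySem.List.pyGetD curr (jcb.1 - 1) 0 + 1)
                (PySem.List.pyGetD prev (jcb.1 - 1) 0 + (if icab.2 == jcb.2 then 0 else 1)))])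
          [icab.1])
      ((List.range (b.length + 1)).map (fun j => (pvLev (a.take k) (b.take j) : Int)))
    = (List.range (b.length + 1)).map (fun j => (pvLev a (b.take j) : Int)) := by
  intro tl
  induction tl with
  | nil =>
      intro k hdrop hk
      have hlen : a.length ≤ k := by
        have := congrArg List.length hdrop
        simp at this; omega
      have : k = a.length := le_antisymm hk hlen
      subst this
      simp [PySem.List.enumerate_nil]
  | cons ca tl' ih =>
      intro k hdrop hk
      have hklt : k < a.length := by
        by_contra hge
        rw [List.drop_eq_nil_of_le (by omega)] at hdrop
        exact List.cons_ne_nil ca tl' hdrop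
      have hdec : a.drop k = a[k] :: a.drop (k + 1) := List.drop_eq_getElem_cons hklt
      rw [hdec] at hdrop
      obtain ⟨hc, htl⟩ : ca = a[k] ∧ tl' = a.drop (k + 1) := by
        have := hdrop
        simp only [List.cons.injEq] at this
        exact this
      rw [PySem.List.enumerate_cons, List.foldl_cons]
      have htake : a.take (k + 1) = a.take k ++ [a[k]] := List.take_succ_eq_append_getElem hklt
      have hrec : ∀ (j : Nat) (h : j < b.length),
          (pvLev (a.take (k + 1)) (b.take (j + 1)) : Int) =
            min ((pvLev (a.take k) (b.take (j + 1)) : Int) + 1)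
              (min ((pvLev (a.take (k + 1)) (b.take j) : Int) + 1)
                ((pvLev (a.take k) (b.take j) : Int) + (if ca == b[j] then 0 else 1))) := by
        intro j hj
        have htb : b.take (j + 1) = b.take j ++ [b[j]] := List.take_succ_eq_append_getElem hj
        have happ := pvLev_append ((a.take k).length + (b.take j).length)
          (a.take k) (b.take j) a[k] b[j] le_rfl
        rw [htake, htb, happ]
        have hcost : (if ca == b[j] then (0 : Int) else 1) = ((if a[k] = b[j] then (0 : Nat) else 1) : Int) := by
          rw [hc]; by_cases hxx : a[k] = b[j] <;> simp [hxx]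
        rw [hcost]
        push_cast
        rw [← htake]
      have hstep :
          (PySem.List.enumerate b 1).foldl
            (fun curr jcb => curr ++
              [min (PySem.List.pyGetD ((List.range (b.length + 1)).map
                    (fun j => (pvLev (a.take k) (b.take j) : Int))) jcb.1 0 + 1)
                (min (PySem.List.pyGetD curr (jcb.1 - 1) 0 + 1)
                  (PySem.List.pyGetD ((List.range (b.length + 1)).map
                    (fun j => (pvLev (a.take k) (b.take j) : Int))) (jcb.1 - 1) 0 +
                    (if ca == jcb.2 then 0 else 1)))])
            [((k : Int) + 1)]
          = (List.range (b.length + 1)).map (fun j => (pvLev (a.take (k + 1)) (b.take j) : Int)) := by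
        have hinit : [((k : Int) + 1)] =
            (List.range (0 + 1)).map (fun j => (pvLev (a.take (k + 1)) (b.take j) : Int)) := by
          simp [pvLev_nil_right]
          omega
        rw [hinit]
        have h := pvDP_inner ca (fun j => (pvLev (a.take k) (b.take j) : Int))
          (fun j => (pvLev (a.take (k + 1)) (b.take j) : Int)) b
          (fun j hj => hrec j hj) b 0 (by simp) (by omega)
        simpa using h
      rw [hstep]
      have : ((k : Int) + 1) + 1 = (((k + 1 : Nat) : Int) + 1) := by push_cast; ring
      rw [this]
      exact ih (k + 1) htl (by omega)

theorem pvLevA_eq (a b : String) : pvLevA a b = (pvLev a.toList b.toList : Int) := by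
  unfold pvLevA
  by_cases hab : a = b
  · subst hab
    simp only [beq_self_eq_true, if_true]
    rw [(pvLev_eq_zero_iff a.toList a.toList).mpr rfl]
    simp
  · have hab' : (a == b) = false := by simp [hab]
    simp only [hab', Bool.false_eq_true, if_false]
    by_cases ha : a = ""
    · subst ha
      simp only [beq_self_eq_true, if_true]
      simp [pvLev_nil_left, PySem.Str.len_eq]
    · have ha' : (a == "") = false := by simp [ha]
      simp only [ha', Bool.false_eq_true, if_false]
      by_cases hb : b = ""
      · subst hb
        simp only [beq_self_eq_true, if_true]
        simp [pvLev_nil_right, PySem.Str.len_eq]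
      · have hb' : (b == "") = false := by simp [hb]
        simp only [hb', Bool.false_eq_true, if_false]
        have hprev0 : PySem.List.pyRange 0 (PySem.Str.len b + 1) 1 =
            (List.range (b.toList.length + 1)).map
              (fun j => (pvLev (a.toList.take 0) (b.toList.take j) : Int)) := by
          rw [PySem.Str.len_eq,
            show ((b.toList.length : Int) + 1) = ((b.toList.length + 1 : Nat) : Int) by push_cast; ring,
            PySem.List.pyRange_zero_natCast]
          apply List.map_congr_left
          intro j hj
          simp only [List.mem_range] at hj
          simp only [List.take_zero, pvLev_nil_left, List.length_take]
          omega
        rw [hprev0]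
        have h := pvDP_outer a.toList b.toList a.toList 0 (by simp) (by omega)
        simp only [Nat.cast_zero, zero_add] at h
        rw [h]
        rw [List.range_succ, List.map_append, List.map_cons, List.map_nil,
          PySem.List.pyGetD_neg_one_append_singleton, List.take_length]

theorem pvGoB_eq (a b : List Char) : pvGoB a b = decide (pvLev a b ≤ 1) := by
  induction a generalizing b with
  | nil =>
      cases b with
      | nil => simp [pvGoB, pvCheck1, pvLev]
      | cons y ys => cases ys <;> simp [pvGoB, pvCheck1, pvLev]
  | cons x xs ih =>
      cases b with
      | nil => cases xs <;> simp [pvGoB, pvCheck1, pvLev_nil_right]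
      | cons y ys =>
          by_cases hxy : x = y
          · subst hxy
            simp only [pvGoB, BEq.rfl, if_true, ih ys, pvLev_cons_same]
          · have hxyb : (x == y) = false := by simp [hxy]
            have hsplit : pvLev (x :: xs) (y :: ys) =
                min (pvLev xs (y :: ys) + 1)
                  (min (pvLev (x :: xs) ys + 1) (pvLev xs ys + (if x = y then 0 else 1))) := by
              conv_lhs => rw [pvLev]
            rw [Bool.eq_iff_iff]
            simp only [pvGoB, hxyb, Bool.false_eq_true, if_false, pvCheck1, List.drop_succ_cons,
              List.drop_zero, Bool.or_eq_true, beq_iff_eq, decide_eq_true_eq, hsplit, if_neg hxy]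
            rw [← pvLev_eq_zero_iff xs ys, ← pvLev_eq_zero_iff (x :: xs) ys,
              ← pvLev_eq_zero_iff xs (y :: ys)]
            omega

theorem pvCondA_eq (t lt : String) : pvCondA t lt = pvEdit1 t lt := by
  unfold pvCondA pvEdit1
  rw [pvLevA_eq, pvGoB_eq]
  simp only [PySem.Str.len_eq]
  by_cases h : (((t.toList.length : Int)) - ((lt.toList.length : Int))).natAbs ≤ 1
  · rw [if_neg (by omega), Bool.eq_iff_iff]
    simp only [Bool.and_eq_true, decide_eq_true_eq]
    constructor
    · rintro ⟨-, h2⟩; exact_mod_cast h2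
    · intro h2; exact ⟨h, by exact_mod_cast h2⟩
  · rw [if_pos (by omega)]
    have h' := h
    simp only [String.length_toList] at h'
    simp [h']

theorem pvAnyMatchA_eq (ts : List String) (lt : String) :
    pvAnyMatchA ts lt = ts.any (fun t => pvEdit1 t lt) := by
  induction ts with
  | nil => simp [pvAnyMatchA]
  | cons t ts ih =>
      simp only [pvAnyMatchA, List.any_cons, pvCondA_eq]
      cases h : pvEdit1 t lt with
      | false => simp [ih]
      | true => simp

theorem pvAllMatchA_eq (ts : List String) (ls : List String) :
    pvAllMatchA ts ls = ls.all (fun lt => ts.any (fun t => pvEdit1 t lt)) := by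
  induction ls with
  | nil => simp [pvAllMatchA]
  | cons lt ls ih =>
      simp only [pvAllMatchA, List.all_cons, pvAnyMatchA_eq]
      cases h : ts.any (fun t => pvEdit1 t lt) with
      | false => simp
      | true => simp [ih]

-- ===== VERDICT (by name: the statement is the Claim_ definition above) =====
theorem fuzzy_contains_py_spec : Claim_equal_fuzzy_contains_py := by
  intro text label _
  unfold Spec_fuzzy_contains_py fuzzy_contains_py fuzzy_contains_py_alt
  cases h : PySem.Str.split₀ label with
  | nil => simp
  | cons lt rest =>
      cases rest with
      | nil =>
          simp [pvAnyMatchA_eq, PySem.List.pyGetD_zero_cons]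
      | cons lt2 rest2 =>
          simp [pvAllMatchA_eq]
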